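-- pv_equiv track=rewrite | github.com/dmitry-uraev/termlint | termlint/extraction/extractors/cvalue_support/scorer.py | _build_nested_index
-- ===== SOURCE A (Python) =====
-- from collections import defaultdict
-- from typing import Dict, List, Tuple
--
-- def _build_nested_index(candidates: Dict[str, Dict]) -> Dict[str, List[int]]:
--     """Map each candidate to frequencies of longer parent candidates."""
--     nested_in: Dict[str, List[int]] = defaultdict(list)
--     candidate_texts = list(candidates.keys())
--
--     for term in candidate_texts:
--         term_words = term.split()
--         term_len = len(term_words)
--
--         for parent in candidate_texts:
--             parent_words = parent.split()
--             parent_len = len(parent_words)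
--
--             if parent_len <= term_len:
--                 continue
--
--             for start in range(parent_len - term_len + 1):
--                 if parent_words[start:start + term_len] == term_words:
--                     nested_in[term].append(candidates[parent]["freq"])
--                     break
--
--     return nested_in
-- ===== SOURCE B (Python) =====
-- from typing import Dict, List
--
--
-- def _build_nested_index(candidates: Dict[str, Dict]) -> Dict[str, List[int]]:
--     """Map each candidate to frequencies of longer parent candidates.
--
--     One pass over the parents builds an inverted index from every distinct
--     proper contiguous word-subsequence of a parent to that parent's info;
--     each term is then answered by a single lookup.
--     """
--     index: Dict[tuple, List[Dict]] = {}
--     for parent, info in candidates.items():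
--         words = parent.split()
--         n = len(words)
--         seen = set()
--         for length in range(0, n):
--             for start in range(n - length + 1):
--                 sub = tuple(words[start:start + length])
--                 if sub not in seen:
--                     seen.add(sub)
--                     index.setdefault(sub, []).append(info)
--     return {term: [info["freq"] for info in index[key]] for term in candidates
--             if (key := tuple(term.split())) in index}
-- ===== Notes on version B (the rewrite author's own statement) =====
-- stated objective: faster
-- what changed: Instead of comparing every term against every window of every parent (n^2 scans), B makes one pass over the parents building an inverted index from each distinct proper contiguous word-subsequence to the parents' frequencies, then answers each term by a single dictionary lookup.
import Mathlib
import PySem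

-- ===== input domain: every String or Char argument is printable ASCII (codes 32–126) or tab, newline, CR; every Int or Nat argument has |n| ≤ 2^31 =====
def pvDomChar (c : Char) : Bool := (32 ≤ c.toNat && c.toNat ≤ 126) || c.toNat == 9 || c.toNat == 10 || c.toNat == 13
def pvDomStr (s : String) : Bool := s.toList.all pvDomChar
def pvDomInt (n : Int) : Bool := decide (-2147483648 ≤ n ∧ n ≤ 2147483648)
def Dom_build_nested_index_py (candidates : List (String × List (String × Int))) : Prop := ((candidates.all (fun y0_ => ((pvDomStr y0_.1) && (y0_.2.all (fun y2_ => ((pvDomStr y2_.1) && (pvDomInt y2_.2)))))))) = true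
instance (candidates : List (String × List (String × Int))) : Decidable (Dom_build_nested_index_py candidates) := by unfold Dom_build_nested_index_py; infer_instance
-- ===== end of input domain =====

-- B replaces A's all-pairs window scan by an inverted index built in one pass over the
-- parents (every distinct proper contiguous word-subsequence ↦ the parents' infos),
-- answering each term by a single lookup; equivalence of the returned dict is proved on Pre_.

-- ===== PORT A =====
-- candidates[parent]["freq"]: total via .getD ([] / 0); Pre_ guarantees the keys are
-- present wherever this is evaluated, so it is exact there.
def pvFreq (candidates : List (String × List (String × Int))) (p : String) : Int :=
  ((PySem.Dict.mk (((PySem.Dict.mk candidates).get? p).getD [])).get? "freq").getD 0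

-- literal transliteration of A: defaultdict append = insert (getD ++ [freq]); the inner
-- `for start … : if …: append; break` appends once iff some start matches, ported as `.any`.
def build_nested_index_py (candidates : List (String × List (String × Int))) : List (String × List Int) :=
  let candidate_texts := (PySem.Dict.mk candidates).keys
  (candidate_texts.foldl (fun nested term =>
    let term_words := PySem.Str.split₀ term
    let term_len := term_words.length
    candidate_texts.foldl (fun nested parent =>
      let parent_words := PySem.Str.split₀ parent
      let parent_len := parent_words.length
      if parent_len ≤ term_len then nested
      else if (PySem.List.pyRange 0 ((parent_len : Int) - (term_len : Int) + 1) 1).any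
               (fun start => PySem.List.slice parent_words (some start) (some (start + (term_len : Int))) == term_words)
      then nested.insert term (nested.getD term [] ++ [pvFreq candidates parent])
      else nested) nested)
    (PySem.Dict.empty : PySem.Dict String (List Int))).items

-- ===== PORT B =====
-- info["freq"]: total via .getD 0; Pre_ guarantees "freq" is present wherever this is evaluated.
def pvFreqOf (info : List (String × Int)) : Int :=
  ((PySem.Dict.mk info).get? "freq").getD 0

-- literal transliteration of B (Source B): one pass over the parents building the inverted
-- index (setdefault-append, with a per-parent `seen` set), then a dict comprehension.
def build_nested_index_py_alt (candidates : List (String × List (String × Int))) : List (String × List Int) :=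
  let index : PySem.Dict (List String) (List (List (String × Int))) :=
    candidates.foldl (fun index pp =>
      let words := PySem.Str.split₀ pp.1
      let n := words.length
      ((PySem.List.pyRange 0 (n : Int) 1).foldl (fun acc len =>
          (PySem.List.pyRange 0 ((n : Int) - len + 1) 1).foldl (fun acc start =>
            let sub := PySem.List.slice words (some start) (some (start + len))
            if PySem.Set.contains acc.2 sub then acc
            else (acc.1.insert sub (acc.1.getD sub [] ++ [pp.2]), PySem.Set.add acc.2 sub))
            acc)
        (index, (PySem.Set.empty : PySem.Set (List String)))).1)
      PySem.Dict.empty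
  ((PySem.Dict.mk candidates).keys).filterMap (fun term =>
    (index.get? (PySem.Str.split₀ term)).map (fun infos => (term, infos.map pvFreqOf)))

-- ===== PRECONDITION & SPEC =====
-- Pre_ excludes (a) duplicate outer keys — the argument is a Python dict, which cannot
-- contain them — and (b) inputs where Python A raises KeyError: a parent whose word list
-- properly contains some candidate's word list but whose inner dict lacks the key "freq".
def Pre_build_nested_index_py (candidates : List (String × List (String × Int))) : Prop :=
  (candidates.map Prod.fst).Nodup ∧
  ∀ p ∈ candidates,
    (∃ t ∈ candidates, (PySem.Str.split₀ t.1).length < (PySem.Str.split₀ p.1).length ∧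
        (PySem.Str.split₀ t.1) <:+: (PySem.Str.split₀ p.1)) →
    (PySem.Dict.mk p.2).contains "freq" = true
instance (candidates : List (String × List (String × Int))) : Decidable (Pre_build_nested_index_py candidates) := by
  unfold Pre_build_nested_index_py; infer_instance

def pvWitness_build_nested_index_py : (List (String × List (String × Int))) :=
  [("a b", [("freq", 2)]), ("b", [("freq", 3)])]

def Spec_build_nested_index_py (candidates : List (String × List (String × Int))) (out : List (String × List Int)) : Prop := out = build_nested_index_py_alt candidates
instance (candidates : List (String × List (String × Int))) (out : List (String × List Int)) : Decidable (Spec_build_nested_index_py candidates out) := by unfold Spec_build_nested_index_py; infer_instance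

-- ===== CLAIM (what is proved, stated in full; the proofs are below) =====
def Claim_equal_build_nested_index_py : Prop := ∀ (candidates : List (String × List (String × Int))), Dom_build_nested_index_py candidates → Pre_build_nested_index_py candidates → Spec_build_nested_index_py candidates (build_nested_index_py candidates)

-- ===== LEMMAS AND PROOFS =====

-- Shorthands used only by the proofs.
def pvW (s : String) : List String := PySem.Str.split₀ s

-- A's per-(term, parent) test: parent strictly longer, and some window equals the term's words.
def pvMatch (tw pw : List String) : Bool :=
  if pw.length ≤ tw.length then false
  else (PySem.List.pyRange 0 ((pw.length : Int) - (tw.length : Int) + 1) 1).any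
        (fun start => PySem.List.slice pw (some start) (some (start + (tw.length : Int))) == tw)

-- The list of windows B enumerates for one parent (with repetitions, before `seen`-dedup).
def pvSubs (pw : List String) : List (List String) :=
  (PySem.List.pyRange 0 (pw.length : Int) 1).flatMap (fun len =>
    (PySem.List.pyRange 0 ((pw.length : Int) - len + 1) 1).map (fun start =>
      PySem.List.slice pw (some start) (some (start + len))))

-- infos of the parents properly containing tw, in candidate order (B's index entry at tw).
def pvNest (cs : List (String × List (String × Int))) (tw : List String) : List (List (String × Int)) :=
  cs.filterMap (fun pd => if pvMatch tw (pvW pd.1) then some pd.2 else none)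

-- freqs A appends for term t, in candidate order.
def pvLA (cs : List (String × List (String × Int))) (t : String) : List Int :=
  ((PySem.Dict.mk cs).keys).filterMap (fun p => if pvMatch (pvW t) (pvW p) then some (pvFreq cs p) else none)

theorem pv_mem_subs (pw : List String) (k : List String) :
    k ∈ pvSubs pw ↔ pvMatch k pw = true := by
  unfold pvSubs pvMatch
  simp only [List.mem_flatMap, List.mem_map, PySem.List.mem_pyRange_one]
  constructor
  · rintro ⟨len, ⟨h0, hlt⟩, start, ⟨⟨h0s, hlts⟩, hk⟩⟩
    lift len to ℕ using h0 with l
    lift start to ℕ using h0s with s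
    have hn : l < pw.length := by exact_mod_cast hlt
    have hs : s + l ≤ pw.length := by omega
    rw [PySem.List.slice_natCast_add] at hk
    have hklen : k.length = l := by
      rw [← hk]; simp [List.length_take, List.length_drop]; omega
    rw [if_neg (by omega : ¬ pw.length ≤ k.length)]
    rw [List.any_eq_true]
    refine ⟨(s : Int), ?_, ?_⟩
    · rw [PySem.List.mem_pyRange_one]
      constructor
      · positivity
      · omega
    · have : ((s : Int) + (k.length : Int)) = ((s : Int) + (l : Int)) := by rw [hklen]
      rw [this, PySem.List.slice_natCast_add, hk]
      simp
  · intro h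
    by_cases hlen : pw.length ≤ k.length
    · rw [if_pos hlen] at h; exact absurd h (by simp)
    · rw [if_neg hlen, List.any_eq_true] at h
      obtain ⟨start, hmem, hbeq⟩ := h
      refine ⟨(k.length : Int), ⟨by positivity, by omega⟩, start, ⟨?_, ?_⟩⟩
      · exact PySem.List.mem_pyRange_one.mp hmem
      · exact (beq_iff_eq).mp hbeq

theorem pv_innerA (cs : List (String × List (String × Int))) (t : String)
    (ps : List String) (d : PySem.Dict String (List Int)) :
    ps.foldl (fun nested parent =>
        if pvMatch (pvW t) (pvW parent) = true
        then nested.insert t (nested.getD t [] ++ [pvFreq cs parent]) else nested) d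
    = (if (ps.filterMap (fun p => if pvMatch (pvW t) (pvW p) then some (pvFreq cs p) else none)) = []
       then d
       else d.insert t (d.getD t [] ++
          ps.filterMap (fun p => if pvMatch (pvW t) (pvW p) then some (pvFreq cs p) else none))) := by
  induction ps generalizing d with
  | nil => simp
  | cons p ps ih =>
    by_cases hm : pvMatch (pvW t) (pvW p) = true
    · simp only [List.foldl_cons, List.filterMap_cons, hm, if_pos]
      rw [ih]
      by_cases he : (ps.filterMap (fun p => if pvMatch (pvW t) (pvW p) then some (pvFreq cs p) else none)) = []
      · rw [if_pos he]
        simp [he]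
      · rw [if_neg he]
        have h1 : (d.insert t (d.getD t [] ++ [pvFreq cs p])).getD t []
            = d.getD t [] ++ [pvFreq cs p] := PySem.Dict.getD_insert_self _ _ _ _
        rw [h1, PySem.Dict.insert_insert_self]
        simp [List.append_assoc]
    · simp only [List.foldl_cons, List.filterMap_cons, hm]
      simp only [Bool.false_eq_true, if_false, ih]

theorem pv_outerA (LA : String → List Int) (ts : List String) (d : PySem.Dict String (List Int))
    (hnd : ts.Nodup) (hfresh : ∀ t ∈ ts, d.contains t = false) :
    (ts.foldl (fun d t => if LA t = [] then d else d.insert t (d.getD t [] ++ LA t)) d).items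
    = d.items ++ ts.filterMap (fun t => if LA t = [] then none else some (t, LA t)) := by
  induction ts generalizing d with
  | nil => simp
  | cons t ts ih =>
    have hct : d.contains t = false := hfresh t (List.mem_cons_self)
    have hnd' : ts.Nodup := hnd.of_cons
    by_cases h : LA t = []
    · simp only [List.foldl_cons, List.filterMap_cons, h, if_pos]
      exact ih d hnd' (fun t' ht' => hfresh t' (List.mem_cons_of_mem _ ht'))
    · simp only [List.foldl_cons, List.filterMap_cons, h, if_false]
      rw [PySem.Dict.getD_of_not_contains d [] hct]
      rw [ih _ hnd' ?_]
      · rw [PySem.Dict.items_insert_of_not_contains d ([] ++ LA t) hct]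
        simp
      · intro t' ht'
        rw [PySem.Dict.contains_insert]
        have hne : t' ≠ t := fun he => (List.nodup_cons.mp hnd).1 (he ▸ ht')
        simp [hne, hfresh t' (List.mem_cons_of_mem _ ht')]

theorem pv_portA (cs : List (String × List (String × Int)))
    (hnd : (cs.map Prod.fst).Nodup) :
    build_nested_index_py cs
    = ((PySem.Dict.mk cs).keys).filterMap
        (fun t => if pvLA cs t = [] then none else some (t, pvLA cs t)) := by
  unfold build_nested_index_py
  dsimp only
  have hknd : ((PySem.Dict.mk cs).keys).Nodup := hnd
  have h1 : ∀ (term : String) (nested : PySem.Dict String (List Int)),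
      List.foldl (fun nested parent =>
        if (PySem.Str.split₀ parent).length ≤ (PySem.Str.split₀ term).length then nested
        else if (PySem.List.pyRange 0 (((PySem.Str.split₀ parent).length : Int) - ((PySem.Str.split₀ term).length : Int) + 1) 1).any
                 (fun start => PySem.List.slice (PySem.Str.split₀ parent) (some start) (some (start + ((PySem.Str.split₀ term).length : Int))) == PySem.Str.split₀ term)
        then nested.insert term (nested.getD term [] ++ [pvFreq cs parent])
        else nested) nested ((PySem.Dict.mk cs).keys)
      = if pvLA cs term = [] then nested
        else nested.insert term (nested.getD term [] ++ pvLA cs term) := by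
    intro term nested
    rw [List.foldl_ext _ (fun nested parent =>
        if pvMatch (pvW term) (pvW parent) = true
        then nested.insert term (nested.getD term [] ++ [pvFreq cs parent]) else nested)
        nested (fun n p _ => by
          simp only [pvMatch, pvW]
          split_ifs <;> first | rfl | contradiction)]
    exact pv_innerA cs term _ nested
  have hF : (fun (nested : PySem.Dict String (List Int)) (term : String) =>
      List.foldl (fun nested parent =>
        if (PySem.Str.split₀ parent).length ≤ (PySem.Str.split₀ term).length then nested
        else if (PySem.List.pyRange 0 (((PySem.Str.split₀ parent).length : Int) - ((PySem.Str.split₀ term).length : Int) + 1) 1).any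
                 (fun start => PySem.List.slice (PySem.Str.split₀ parent) (some start) (some (start + ((PySem.Str.split₀ term).length : Int))) == PySem.Str.split₀ term)
        then nested.insert term (nested.getD term [] ++ [pvFreq cs parent])
        else nested) nested ((PySem.Dict.mk cs).keys))
      = (fun (d : PySem.Dict String (List Int)) (t : String) =>
          if pvLA cs t = [] then d else d.insert t (d.getD t [] ++ pvLA cs t)) :=
    funext fun n => funext fun t => h1 t n
  rw [hF]
  rw [pv_outerA (pvLA cs) _ _ hknd (fun t _ => PySem.Dict.contains_empty t)]
  simp [PySem.Dict.empty]

theorem pv_perSubs (v : List (String × Int)) (subs : List (List String))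
    (ix : PySem.Dict (List String) (List (List (String × Int)))) (sn : PySem.Set (List String))
    (k : List String) :
    ((subs.foldl (fun acc sub =>
        if PySem.Set.contains acc.2 sub then acc
        else (acc.1.insert sub (acc.1.getD sub [] ++ [v]), PySem.Set.add acc.2 sub)) (ix, sn)).1).get? k
    = (if k ∈ subs ∧ k ∉ sn then some (ix.getD k [] ++ [v]) else ix.get? k) := by
  induction subs generalizing ix sn with
  | nil => simp
  | cons sub rest ih =>
    simp only [List.foldl_cons]
    by_cases hc : PySem.Set.contains sn sub = true
    · rw [if_pos hc, ih ix sn]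
      have hmem : sub ∈ sn := (PySem.Set.contains_iff sn sub).mp hc
      by_cases hk : k = sub
      · subst hk; simp [hmem]
      · simp [List.mem_cons, hk]
    · rw [if_neg hc, ih]
      have hns : sub ∉ sn := fun h => hc ((PySem.Set.contains_iff sn sub).mpr h)
      by_cases hk : k = sub
      · subst hk
        simp [hns]
      · simp [PySem.Set.mem_add, PySem.Dict.get?_insert, PySem.Dict.getD_insert, hk, List.mem_cons]

theorem pv_flatstep (pw : List String) (v : List (String × Int))
    (init : PySem.Dict (List String) (List (List (String × Int))) × PySem.Set (List String)) :
    (PySem.List.pyRange 0 (pw.length : Int) 1).foldl (fun acc len =>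
        (PySem.List.pyRange 0 ((pw.length : Int) - len + 1) 1).foldl (fun acc start =>
          if PySem.Set.contains acc.2 (PySem.List.slice pw (some start) (some (start + len))) then acc
          else (acc.1.insert (PySem.List.slice pw (some start) (some (start + len)))
                  (acc.1.getD (PySem.List.slice pw (some start) (some (start + len))) [] ++ [v]),
                PySem.Set.add acc.2 (PySem.List.slice pw (some start) (some (start + len)))))
          acc) init
    = (pvSubs pw).foldl (fun acc sub =>
        if PySem.Set.contains acc.2 sub then acc
        else (acc.1.insert sub (acc.1.getD sub [] ++ [v]), PySem.Set.add acc.2 sub)) init := by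
  unfold pvSubs
  rw [List.flatMap_def, List.foldl_flatten, List.foldl_map]
  simp only [List.foldl_map]

theorem pv_outerB (cs' : List (String × List (String × Int)))
    (ix : PySem.Dict (List String) (List (List (String × Int)))) (k : List String) :
    (cs'.foldl (fun index pp =>
      ((PySem.List.pyRange 0 ((PySem.Str.split₀ pp.1).length : Int) 1).foldl (fun acc len =>
          (PySem.List.pyRange 0 (((PySem.Str.split₀ pp.1).length : Int) - len + 1) 1).foldl (fun acc start =>
            if PySem.Set.contains acc.2 (PySem.List.slice (PySem.Str.split₀ pp.1) (some start) (some (start + len))) then acc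
            else (acc.1.insert (PySem.List.slice (PySem.Str.split₀ pp.1) (some start) (some (start + len)))
                    (acc.1.getD (PySem.List.slice (PySem.Str.split₀ pp.1) (some start) (some (start + len))) [] ++ [pp.2]),
                  PySem.Set.add acc.2 (PySem.List.slice (PySem.Str.split₀ pp.1) (some start) (some (start + len)))))
            acc)
        (index, (PySem.Set.empty : PySem.Set (List String)))).1) ix).get? k
    = (if ix.get? k = none ∧ pvNest cs' k = [] then none
       else some (ix.getD k [] ++ pvNest cs' k)) := by
  induction cs' generalizing ix with
  | nil =>
    cases h : ix.get? k with
    | none => simp [pvNest, h]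
    | some w => simp [pvNest, h, PySem.Dict.getD_eq_get?_getD]
  | cons pd rest ih =>
    simp only [List.foldl_cons]
    rw [pv_flatstep (PySem.Str.split₀ pd.1) pd.2]
    rw [ih]
    have hg : ((pvSubs (PySem.Str.split₀ pd.1)).foldl (fun acc sub =>
        if PySem.Set.contains acc.2 sub then acc
        else (acc.1.insert sub (acc.1.getD sub [] ++ [pd.2]), PySem.Set.add acc.2 sub))
        (ix, (PySem.Set.empty : PySem.Set (List String)))).1.get? k
        = (if pvMatch k (pvW pd.1) = true then some (ix.getD k [] ++ [pd.2]) else ix.get? k) := by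
      rw [pv_perSubs]
      simp [pv_mem_subs, PySem.Set.empty, pvW]
    have hgD : ((pvSubs (PySem.Str.split₀ pd.1)).foldl (fun acc sub =>
        if PySem.Set.contains acc.2 sub then acc
        else (acc.1.insert sub (acc.1.getD sub [] ++ [pd.2]), PySem.Set.add acc.2 sub))
        (ix, (PySem.Set.empty : PySem.Set (List String)))).1.getD k []
        = (if pvMatch k (pvW pd.1) = true then ix.getD k [] ++ [pd.2] else ix.getD k []) := by
      rw [PySem.Dict.getD_eq_get?_getD, hg]
      by_cases hm : pvMatch k (pvW pd.1) = true
      · simp [hm]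
      · simp [hm, PySem.Dict.getD_eq_get?_getD]
    cases hB : pvMatch k (pvW pd.1) with
    | true =>
      rw [hg, hgD, hB]
      simp only [pvNest, List.filterMap_cons]
      rw [hB]
      simp [List.append_assoc]
    | false =>
      rw [hg, hgD, hB]
      simp only [pvNest, List.filterMap_cons]
      rw [hB]
      simp

theorem pv_portB (cs : List (String × List (String × Int))) :
    build_nested_index_py_alt cs
    = ((PySem.Dict.mk cs).keys).filterMap
        (fun t => if pvNest cs (pvW t) = [] then none
                  else some (t, (pvNest cs (pvW t)).map pvFreqOf)) := by
  unfold build_nested_index_py_alt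
  dsimp only
  refine List.filterMap_congr (fun t _ => ?_)
  rw [pv_outerB cs PySem.Dict.empty (PySem.Str.split₀ t)]
  by_cases h : pvNest cs (PySem.Str.split₀ t) = []
  · simp [h, pvW]
  · simp [h, pvW]

theorem pv_freq_mem (cs : List (String × List (String × Int)))
    (hnd : (cs.map Prod.fst).Nodup) (pd : String × List (String × Int)) (hmem : pd ∈ cs) :
    pvFreq cs pd.1 = pvFreqOf pd.2 := by
  unfold pvFreq pvFreqOf
  have h : (PySem.Dict.mk cs).get? pd.1 = some pd.2 :=
    PySem.Dict.get?_of_mem_items _ (by simpa using hmem) (by simpa [PySem.Dict.keys] using hnd)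
  rw [h]
  rfl

theorem pv_freq_agree (cs : List (String × List (String × Int)))
    (hnd : (cs.map Prod.fst).Nodup) (t : String) :
    pvLA cs t = (pvNest cs (pvW t)).map pvFreqOf := by
  have hsub : ∀ (l : List (String × List (String × Int))), (∀ pd ∈ l, pd ∈ cs) →
      l.filterMap (fun pd => if pvMatch (pvW t) (pvW pd.1) = true then some (pvFreq cs pd.1) else none)
      = (l.filterMap (fun pd => if pvMatch (pvW t) (pvW pd.1) = true then some pd.2 else none)).map pvFreqOf := by
    intro l
    induction l with
    | nil => intro _; simp
    | cons pd rest ih =>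
      intro hl
      have h1 := pv_freq_mem cs hnd pd (hl pd List.mem_cons_self)
      have h2 := ih (fun q hq => hl q (List.mem_cons_of_mem _ hq))
      cases hB : pvMatch (pvW t) (pvW pd.1) with
      | true =>
        rw [List.filterMap_cons, List.filterMap_cons, hB]
        simp [h1, h2]
      | false =>
        rw [List.filterMap_cons, List.filterMap_cons, hB]
        simp [h2]
  unfold pvLA pvNest
  have hkeys : (PySem.Dict.mk cs).keys = cs.map Prod.fst := rfl
  rw [hkeys, List.filterMap_map]
  exact hsub cs (fun _ h => h)

-- ===== VERDICT (by name: the statement is the Claim_ definition above) =====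
theorem build_nested_index_py_spec : Claim_equal_build_nested_index_py := by
  intro cs _hdom hpre
  unfold Spec_build_nested_index_py
  obtain ⟨hnd, _⟩ := hpre
  rw [pv_portA cs hnd, pv_portB cs]
  refine List.filterMap_congr (fun t _ => ?_)
  rw [pv_freq_agree cs hnd t]
  by_cases h : pvNest cs (pvW t) = [] <;> simp [h]
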